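-- pv_equiv track=rewrite | github.com/rodrigowindows/ju-s-miami-trip | scripts/upload-images.py | get_folder
-- ===== SOURCE A (Python) =====
-- def get_folder(category):
--     c = category.lower()
--     if any(x in c for x in ["tech", "eletr"]): return "tech"
--     if any(x in c for x in ["beauty", "beleza", "skin", "maquiagem"]): return "beauty"
--     if any(x in c for x in ["perfum", "fragr"]): return "perfumes"
--     if "victoria" in c: return "vs"
--     if any(x in c for x in ["fashion", "moda", "roupa", "tenis", "acess"]): return "fashion"
--     if any(x in c for x in ["lifestyle", "casa", "bath"]): return "lifestyle"
--     if any(x in c for x in ["health", "saude", "suplement", "vitamin"]): return "supplements"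
--     if any(x in c for x in ["kid", "baby", "brinquedo", "infantil"]): return "kids"
--     return "other"
-- ===== SOURCE B (Python) =====
-- PRIORITY = {
--     "tech": 0, "eletr": 0,
--     "beauty": 1, "beleza": 1, "skin": 1, "maquiagem": 1,
--     "perfum": 2, "fragr": 2,
--     "victoria": 3,
--     "fashion": 4, "moda": 4, "roupa": 4, "tenis": 4, "acess": 4,
--     "lifestyle": 5, "casa": 5, "bath": 5,
--     "health": 6, "saude": 6, "suplement": 6, "vitamin": 6,
--     "kid": 7, "baby": 7, "brinquedo": 7, "infantil": 7,
-- }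
-- FOLDERS = ("tech", "beauty", "perfumes", "vs", "fashion",
--            "lifestyle", "supplements", "kids")
--
-- def get_folder(category):
--     # Single left-to-right scan: at each position record the best (lowest)
--     # priority of any keyword starting there; map the overall best to a folder.
--     c = category.lower()
--     best = len(FOLDERS)
--     while c:
--         for k, p in PRIORITY.items():
--             if p < best and c.startswith(k):
--                 best = p
--         c = c[1:]
--     return FOLDERS[best] if best < len(FOLDERS) else "other"
-- ===== Notes on version B (the rewrite author's own statement) =====
-- stated objective: alternative
-- what changed: Instead of A's fixed cascade of per-group substring membership checks, B makes a single left-to-right scan over the lowered string, at each suffix recording the lowest priority of any keyword that starts there (keyword-to-priority dict), and finally maps the best priority to its folder name, defaulting to other when nothing matched.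
import Mathlib
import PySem

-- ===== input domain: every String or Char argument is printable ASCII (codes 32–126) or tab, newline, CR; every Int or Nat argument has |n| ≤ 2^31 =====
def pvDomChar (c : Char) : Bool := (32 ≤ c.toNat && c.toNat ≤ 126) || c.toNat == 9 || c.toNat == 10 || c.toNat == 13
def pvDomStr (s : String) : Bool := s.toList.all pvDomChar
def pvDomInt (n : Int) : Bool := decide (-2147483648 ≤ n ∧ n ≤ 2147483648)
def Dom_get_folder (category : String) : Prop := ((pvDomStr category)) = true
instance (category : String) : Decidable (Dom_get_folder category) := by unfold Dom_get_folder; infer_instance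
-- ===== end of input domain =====

-- B replaces A's cascade of per-group `any`/`in` checks by one left-to-right scan over the lowered string that keeps the best (lowest) matched keyword priority, mapped to a folder at the end (alternative decomposition; same behaviour).


-- ===== PORT A =====
def get_folder (category : String) : String :=
  let c := PySem.Str.lower category
  if ["tech", "eletr"].any (fun x => PySem.Str.isIn x c) then "tech"
  else if ["beauty", "beleza", "skin", "maquiagem"].any (fun x => PySem.Str.isIn x c) then "beauty"
  else if ["perfum", "fragr"].any (fun x => PySem.Str.isIn x c) then "perfumes"
  else if PySem.Str.isIn "victoria" c then "vs"
  else if ["fashion", "moda", "roupa", "tenis", "acess"].any (fun x => PySem.Str.isIn x c) then "fashion"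
  else if ["lifestyle", "casa", "bath"].any (fun x => PySem.Str.isIn x c) then "lifestyle"
  else if ["health", "saude", "suplement", "vitamin"].any (fun x => PySem.Str.isIn x c) then "supplements"
  else if ["kid", "baby", "brinquedo", "infantil"].any (fun x => PySem.Str.isIn x c) then "kids"
  else "other"

-- ===== PORT B =====
-- Source B's PRIORITY dict: keyword (as chars) → priority (insertion order kept)
def prioTable : List (List Char × Nat) :=
  [ ("tech".toList, 0), ("eletr".toList, 0),
    ("beauty".toList, 1), ("beleza".toList, 1), ("skin".toList, 1), ("maquiagem".toList, 1),
    ("perfum".toList, 2), ("fragr".toList, 2),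
    ("victoria".toList, 3),
    ("fashion".toList, 4), ("moda".toList, 4), ("roupa".toList, 4), ("tenis".toList, 4), ("acess".toList, 4),
    ("lifestyle".toList, 5), ("casa".toList, 5), ("bath".toList, 5),
    ("health".toList, 6), ("saude".toList, 6), ("suplement".toList, 6), ("vitamin".toList, 6),
    ("kid".toList, 7), ("baby".toList, 7), ("brinquedo".toList, 7), ("infantil".toList, 7) ]

-- Source B's FOLDERS tuple
def foldersB : List String :=
  ["tech", "beauty", "perfumes", "vs", "fashion", "lifestyle", "supplements", "kids"]

-- the inner `for k, p in PRIORITY.items()` loop of Source B (c.startswith(k) at the current suffix)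
def scanStep (l : List Char) (b : Nat) : Nat :=
  prioTable.foldl (fun b kp => if kp.2 < b ∧ kp.1.isPrefixOf l then kp.2 else b) b

-- Source B's `while c: … ; c = c[1:]` loop
def scanBest : List Char → Nat → Nat
  | [], b => b
  | l@(_ :: rest), b => scanBest rest (scanStep l b)

def get_folder_alt (category : String) : String :=
  let c := (PySem.Str.lower category).toList
  let best := scanBest c foldersB.length
  if best < foldersB.length then foldersB.getD best "other" else "other"

-- ===== PRECONDITION & SPEC =====
def Spec_get_folder (category : String) (out : String) : Prop := out = get_folder_alt category
instance (category : String) (out : String) : Decidable (Spec_get_folder category out) := by unfold Spec_get_folder; infer_instance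

-- ===== CLAIM =====
def Claim_equal_get_folder : Prop := ∀ (category : String), Dom_get_folder category → Spec_get_folder category (get_folder category)

-- ===== LEMMAS AND PROOFS =====

-- some keyword of priority ≤ p occurs somewhere in L
def matchBelow (L : List Char) (p : Nat) : Prop := ∃ kp ∈ prioTable, kp.2 ≤ p ∧ kp.1 <:+: L

lemma foldl_step_le_iff (t : List (List Char × Nat)) (l : List Char) (b p : Nat) :
    t.foldl (fun b kp => if kp.2 < b ∧ kp.1.isPrefixOf l then kp.2 else b) b ≤ p
      ↔ b ≤ p ∨ ∃ kp ∈ t, kp.2 ≤ p ∧ kp.1 <+: l := by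
  induction t generalizing b with
  | nil => simp
  | cons kp t ih =>
    simp only [List.foldl_cons, ih, List.mem_cons]
    by_cases h : kp.2 < b ∧ kp.1.isPrefixOf l = true
    · rw [if_pos h]
      have hpref : kp.1 <+: l := List.isPrefixOf_iff_prefix.mp h.2
      constructor
      · rintro (h1 | ⟨q, hq, h2, h3⟩)
        · exact Or.inr ⟨kp, Or.inl rfl, h1, hpref⟩
        · exact Or.inr ⟨q, Or.inr hq, h2, h3⟩
      · rintro (h1 | ⟨q, hq, h2, h3⟩)
        · exact Or.inl (by omega)
        · rcases hq with rfl | hq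
          · exact Or.inl h2
          · exact Or.inr ⟨q, hq, h2, h3⟩
    · rw [if_neg h]
      constructor
      · rintro (h1 | ⟨q, hq, h2, h3⟩)
        · exact Or.inl h1
        · exact Or.inr ⟨q, Or.inr hq, h2, h3⟩
      · rintro (h1 | ⟨q, hq, h2, h3⟩)
        · exact Or.inl h1
        · rcases hq with rfl | hq
          · have : ¬ q.2 < b := fun hlt => h ⟨hlt, List.isPrefixOf_iff_prefix.mpr h3⟩
            exact Or.inl (by omega)
          · exact Or.inr ⟨q, hq, h2, h3⟩

lemma table_ne_nil : ∀ kp ∈ prioTable, kp.1 ≠ ([] : List Char) := by decide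

lemma scanBest_le_iff (l : List Char) (b p : Nat) :
    scanBest l b ≤ p ↔ b ≤ p ∨ matchBelow l p := by
  induction l generalizing b with
  | nil =>
    simp only [scanBest, matchBelow, List.infix_nil]
    constructor
    · exact Or.inl
    · rintro (h | ⟨q, hq, _, h3⟩)
      · exact h
      · exact absurd h3 (table_ne_nil q hq)
  | cons a rest ih =>
    show scanBest rest (scanStep (a :: rest) b) ≤ p ↔ _
    rw [ih, scanStep, foldl_step_le_iff]
    unfold matchBelow
    constructor
    · rintro ((h | ⟨q, hq, h2, h3⟩) | ⟨q, hq, h2, h3⟩)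
      · exact Or.inl h
      · exact Or.inr ⟨q, hq, h2, List.infix_cons_iff.mpr (Or.inl h3)⟩
      · exact Or.inr ⟨q, hq, h2, List.infix_cons_iff.mpr (Or.inr h3)⟩
    · rintro (h | ⟨q, hq, h2, h3⟩)
      · exact Or.inl (Or.inl h)
      · rcases List.infix_cons_iff.mp h3 with h3 | h3
        · exact Or.inl (Or.inr ⟨q, hq, h2, h3⟩)
        · exact Or.inr ⟨q, hq, h2, h3⟩

-- group conditions, A-side (on the lowered string c)
lemma match0 (c : String) : matchBelow c.toList 0 ↔
    (["tech", "eletr"].any (fun x => PySem.Str.isIn x c)) = true := by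
  simp [matchBelow, prioTable, PySem.Chars.isIn_iff_infix]

set_option maxHeartbeats 2000000 in
lemma match1 (c : String) : matchBelow c.toList 1 ↔
    (["tech", "eletr"].any (fun x => PySem.Str.isIn x c)) = true ∨
    (["beauty", "beleza", "skin", "maquiagem"].any (fun x => PySem.Str.isIn x c)) = true := by
  simp [matchBelow, prioTable, PySem.Chars.isIn_iff_infix]; tauto

set_option maxHeartbeats 2000000 in
lemma match2 (c : String) : matchBelow c.toList 2 ↔ matchBelow c.toList 1 ∨
    (["perfum", "fragr"].any (fun x => PySem.Str.isIn x c)) = true := by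
  simp [matchBelow, prioTable, PySem.Chars.isIn_iff_infix]; tauto

set_option maxHeartbeats 2000000 in
lemma match3 (c : String) : matchBelow c.toList 3 ↔ matchBelow c.toList 2 ∨
    PySem.Str.isIn "victoria" c = true := by
  simp [matchBelow, prioTable, PySem.Chars.isIn_iff_infix]; tauto

set_option maxHeartbeats 2000000 in
lemma match4 (c : String) : matchBelow c.toList 4 ↔ matchBelow c.toList 3 ∨
    (["fashion", "moda", "roupa", "tenis", "acess"].any (fun x => PySem.Str.isIn x c)) = true := by
  simp [matchBelow, prioTable, PySem.Chars.isIn_iff_infix]; tauto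

set_option maxHeartbeats 2000000 in
lemma match5 (c : String) : matchBelow c.toList 5 ↔ matchBelow c.toList 4 ∨
    (["lifestyle", "casa", "bath"].any (fun x => PySem.Str.isIn x c)) = true := by
  simp [matchBelow, prioTable, PySem.Chars.isIn_iff_infix]; tauto

set_option maxHeartbeats 2000000 in
lemma match6 (c : String) : matchBelow c.toList 6 ↔ matchBelow c.toList 5 ∨
    (["health", "saude", "suplement", "vitamin"].any (fun x => PySem.Str.isIn x c)) = true := by
  simp [matchBelow, prioTable, PySem.Chars.isIn_iff_infix]; tauto

set_option maxHeartbeats 2000000 in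
lemma match7 (c : String) : matchBelow c.toList 7 ↔ matchBelow c.toList 6 ∨
    (["kid", "baby", "brinquedo", "infantil"].any (fun x => PySem.Str.isIn x c)) = true := by
  simp [matchBelow, prioTable, PySem.Chars.isIn_iff_infix]; tauto

-- ===== VERDICT =====
theorem get_folder_spec : Claim_equal_get_folder := by
  intro category _
  unfold Spec_get_folder get_folder get_folder_alt
  set c := PySem.Str.lower category with hc
  have hle : ∀ p, scanBest c.toList 8 ≤ p ↔ 8 ≤ p ∨ matchBelow c.toList p :=
    fun p => scanBest_le_iff c.toList 8 p
  have h8 : (scanBest c.toList 8) ≤ 8 := (hle 8).mpr (Or.inl le_rfl)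
  by_cases g0 : (["tech", "eletr"].any (fun x => PySem.Str.isIn x c)) = true
  · have e : (scanBest c.toList 8) = 0 := by have := (hle 0).mpr (Or.inr ((match0 c).mpr g0)); omega
    rw [if_pos g0]; simp [e, foldersB]
  · have nm0 : ¬ matchBelow c.toList 0 := fun h => g0 ((match0 c).mp h)
    by_cases g1 : (["beauty", "beleza", "skin", "maquiagem"].any (fun x => PySem.Str.isIn x c)) = true
    · have e : (scanBest c.toList 8) = 1 := by
        have h1 := (hle 1).mpr (Or.inr ((match1 c).mpr (Or.inr g1)))
        have h0 : ¬ (scanBest c.toList 8) ≤ 0 := fun h => by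
          rcases (hle 0).mp h with h | h
          · omega
          · exact nm0 h
        omega
      rw [if_neg g0, if_pos g1]; simp [e, foldersB]
    · have nm1 : ¬ matchBelow c.toList 1 := fun h => by
        rcases (match1 c).mp h with h | h
        · exact g0 h
        · exact g1 h
      by_cases g2 : (["perfum", "fragr"].any (fun x => PySem.Str.isIn x c)) = true
      · have e : (scanBest c.toList 8) = 2 := by
          have h2 := (hle 2).mpr (Or.inr ((match2 c).mpr (Or.inr g2)))
          have h1 : ¬ (scanBest c.toList 8) ≤ 1 := fun h => by
            rcases (hle 1).mp h with h | h
            · omega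
            · exact nm1 h
          omega
        rw [if_neg g0, if_neg g1, if_pos g2]; simp [e, foldersB]
      · have nm2 : ¬ matchBelow c.toList 2 := fun h => by
          rcases (match2 c).mp h with h | h
          · exact nm1 h
          · exact g2 h
        by_cases g3 : PySem.Str.isIn "victoria" c = true
        · have e : (scanBest c.toList 8) = 3 := by
            have h3 := (hle 3).mpr (Or.inr ((match3 c).mpr (Or.inr g3)))
            have h2 : ¬ (scanBest c.toList 8) ≤ 2 := fun h => by
              rcases (hle 2).mp h with h | h
              · omega
              · exact nm2 h
            omega
          rw [if_neg g0, if_neg g1, if_neg g2, if_pos g3]; simp [e, foldersB]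
        · have nm3 : ¬ matchBelow c.toList 3 := fun h => by
            rcases (match3 c).mp h with h | h
            · exact nm2 h
            · exact g3 h
          by_cases g4 : (["fashion", "moda", "roupa", "tenis", "acess"].any (fun x => PySem.Str.isIn x c)) = true
          · have e : (scanBest c.toList 8) = 4 := by
              have h4 := (hle 4).mpr (Or.inr ((match4 c).mpr (Or.inr g4)))
              have h3 : ¬ (scanBest c.toList 8) ≤ 3 := fun h => by
                rcases (hle 3).mp h with h | h
                · omega
                · exact nm3 h
              omega
            rw [if_neg g0, if_neg g1, if_neg g2, if_neg g3, if_pos g4]; simp [e, foldersB]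
          · have nm4 : ¬ matchBelow c.toList 4 := fun h => by
              rcases (match4 c).mp h with h | h
              · exact nm3 h
              · exact g4 h
            by_cases g5 : (["lifestyle", "casa", "bath"].any (fun x => PySem.Str.isIn x c)) = true
            · have e : (scanBest c.toList 8) = 5 := by
                have h5 := (hle 5).mpr (Or.inr ((match5 c).mpr (Or.inr g5)))
                have h4 : ¬ (scanBest c.toList 8) ≤ 4 := fun h => by
                  rcases (hle 4).mp h with h | h
                  · omega
                  · exact nm4 h
                omega
              rw [if_neg g0, if_neg g1, if_neg g2, if_neg g3, if_neg g4, if_pos g5]; simp [e, foldersB]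
            · have nm5 : ¬ matchBelow c.toList 5 := fun h => by
                rcases (match5 c).mp h with h | h
                · exact nm4 h
                · exact g5 h
              by_cases g6 : (["health", "saude", "suplement", "vitamin"].any (fun x => PySem.Str.isIn x c)) = true
              · have e : (scanBest c.toList 8) = 6 := by
                  have h6 := (hle 6).mpr (Or.inr ((match6 c).mpr (Or.inr g6)))
                  have h5 : ¬ (scanBest c.toList 8) ≤ 5 := fun h => by
                    rcases (hle 5).mp h with h | h
                    · omega
                    · exact nm5 h
                  omega
                rw [if_neg g0, if_neg g1, if_neg g2, if_neg g3, if_neg g4, if_neg g5, if_pos g6]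
                simp [e, foldersB]
              · have nm6 : ¬ matchBelow c.toList 6 := fun h => by
                  rcases (match6 c).mp h with h | h
                  · exact nm5 h
                  · exact g6 h
                by_cases g7 : (["kid", "baby", "brinquedo", "infantil"].any (fun x => PySem.Str.isIn x c)) = true
                · have e : (scanBest c.toList 8) = 7 := by
                    have h7 := (hle 7).mpr (Or.inr ((match7 c).mpr (Or.inr g7)))
                    have h6 : ¬ (scanBest c.toList 8) ≤ 6 := fun h => by
                      rcases (hle 6).mp h with h | h
                      · omega
                      · exact nm6 h
                    omega
                  rw [if_neg g0, if_neg g1, if_neg g2, if_neg g3, if_neg g4, if_neg g5, if_neg g6,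
                      if_pos g7]
                  simp [e, foldersB]
                · have nm7 : ¬ matchBelow c.toList 7 := fun h => by
                    rcases (match7 c).mp h with h | h
                    · exact nm6 h
                    · exact g7 h
                  have e : (scanBest c.toList 8) = 8 := by
                    have h7 : ¬ (scanBest c.toList 8) ≤ 7 := fun h => by
                      rcases (hle 7).mp h with h | h
                      · omega
                      · exact nm7 h
                    omega
                  rw [if_neg g0, if_neg g1, if_neg g2, if_neg g3, if_neg g4, if_neg g5, if_neg g6,
                      if_neg g7]
                  simp [e, foldersB]
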